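-- pv_equiv track=rewrite | github.com/direct-phonology/dphon | dphon/lib.py | get_linemap
-- ===== SOURCE A (Python) =====
-- def get_linemap(text: str):
--     m = []
--     l = 1
--     for char in text:
--         m.append(l)
--         if char == '\n':
--             l += 1
--     return m
-- ===== SOURCE B (Python) =====
-- def get_linemap(text: str):
--     lines = text.split('\n')
--     last = len(lines) - 1
--     m = []
--     for i, line in enumerate(lines):
--         m.extend([i + 1] * (len(line) + (1 if i < last else 0)))
--     return m
-- ===== Notes on version B (the rewrite author's own statement) =====
-- stated objective: alternative
-- what changed: B splits the text into lines once and emits each line number in a block (len(line), plus one for the consumed newline on non-final lines), instead of scanning character by character while tracking a line counter.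
import Mathlib
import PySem

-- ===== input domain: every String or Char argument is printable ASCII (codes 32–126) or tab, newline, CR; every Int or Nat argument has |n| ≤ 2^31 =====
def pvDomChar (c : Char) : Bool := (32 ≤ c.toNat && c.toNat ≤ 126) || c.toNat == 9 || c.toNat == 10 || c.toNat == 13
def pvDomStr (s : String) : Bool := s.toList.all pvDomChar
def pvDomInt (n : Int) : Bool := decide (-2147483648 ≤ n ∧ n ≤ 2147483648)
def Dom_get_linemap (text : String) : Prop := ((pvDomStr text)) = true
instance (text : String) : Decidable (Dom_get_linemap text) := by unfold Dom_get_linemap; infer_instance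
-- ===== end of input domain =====

-- B splits the text into lines once and emits each line number in a block per line
-- (len(line) copies, plus one for the consumed newline on non-final lines),
-- instead of scanning character by character while tracking a line counter (alternative decomposition, same cost).


-- ===== PORT A =====
def get_linemap (text : String) : List Int :=
  (text.toList.foldl
    (fun (st : List Int × Int) c =>
      (st.1 ++ [st.2], if c = '\n' then st.2 + 1 else st.2))
    (([] : List Int), (1 : Int))).1

-- ===== PORT B =====
def get_linemap_alt (text : String) : List Int :=
  let lines := PySem.Chars.splitOn text.toList ['\n']
  let last : Int := (lines.length : Int) - 1
  (PySem.List.enumerate lines 0).foldl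
    (fun m p => m ++ List.replicate (p.2.length + (if p.1 < last then 1 else 0)) (p.1 + 1)) []

-- ===== PRECONDITION & SPEC =====
def Spec_get_linemap (text : String) (out : List Int) : Prop := out = get_linemap_alt text
instance (text : String) (out : List Int) : Decidable (Spec_get_linemap text out) := by unfold Spec_get_linemap; infer_instance

-- ===== CLAIM (what is proved, stated in full; the proofs are below) =====
def Claim_equal_get_linemap : Prop := ∀ (text : String), Dom_get_linemap text → Spec_get_linemap text (get_linemap text)

-- ===== LEMMAS AND PROOFS =====

-- A's result as a structural recursion: line numbers of cs starting at line l
def lmA (l : Int) : List Char → List Int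
  | [] => []
  | c :: cs => l :: lmA (if c = '\n' then l + 1 else l) cs

theorem foldA_eq (cs : List Char) : ∀ (m : List Int) (l : Int),
    (cs.foldl (fun (st : List Int × Int) c =>
      (st.1 ++ [st.2], if c = '\n' then st.2 + 1 else st.2)) (m, l)).1 = m ++ lmA l cs := by
  induction cs with
  | nil => intro m l; simp [lmA]
  | cons c cs ih => intro m l; simp [List.foldl, lmA, ih]

-- split on a single '\n', accumulating the current (already reversed-back) line prefix
def mysplit (pre : List Char) : List Char → List (List Char)
  | [] => [pre]
  | c :: rest => if c = '\n' then pre :: mysplit [] rest else mysplit (pre ++ [c]) rest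

theorem mysplit_ne_nil (cs : List Char) : ∀ pre, mysplit pre cs ≠ [] := by
  induction cs with
  | nil => intro pre; simp [mysplit]
  | cons c rest ih => intro pre; by_cases h : c = '\n' <;> simp [mysplit, h, ih]

theorem go_eq (cs : List Char) : ∀ (fuel : Nat) (cur : List Char) (acc : List (List Char)),
    cs.length ≤ fuel →
    PySem.Chars.splitOn.go ['\n'] fuel cs cur acc = acc.reverse ++ mysplit cur.reverse cs := by
  induction cs with
  | nil =>
      intro fuel cur acc _
      cases fuel <;> simp [PySem.Chars.splitOn.go, mysplit]
  | cons c rest ih =>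
      intro fuel cur acc hle
      cases fuel with
      | zero => simp at hle
      | succ f =>
          by_cases h : c = '\n'
          · subst h
            have hpre : List.isPrefixOf ['\n'] ('\n' :: rest) = true := by
              simp [List.isPrefixOf]
            rw [PySem.Chars.splitOn.go]
            simp only [hpre, if_true, List.length_cons, List.length_nil, List.drop_succ_cons, List.drop_zero]
            rw [ih f [] (cur.reverse :: acc) (by simpa using hle)]
            simp [mysplit]
          · have hpre : List.isPrefixOf ['\n'] (c :: rest) = false := by
              simp only [List.isPrefixOf, Bool.and_true, beq_eq_false_iff_ne, ne_eq]
              exact fun hh => h hh.symm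
            rw [PySem.Chars.splitOn.go]
            simp only [hpre, Bool.false_eq_true, if_false]
            rw [ih f (c :: cur) acc (by simpa using Nat.le_of_succ_le_succ hle)]
            simp [mysplit, h]

theorem splitOn_eq (cs : List Char) : PySem.Chars.splitOn cs ['\n'] = mysplit [] cs := by
  rw [PySem.Chars.splitOn, go_eq cs (cs.length + 1) [] [] (by omega)]
  simp

-- B's block emission over a line list, line number l, last line emits no newline copy
def brun (l : Int) : List (List Char) → List Int
  | [] => []
  | [line] => List.replicate line.length l
  | line :: b :: rest => List.replicate (line.length + 1) l ++ brun (l + 1) (b :: rest)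

theorem brun_mysplit (cs : List Char) : ∀ (pre : List Char) (l : Int),
    brun l (mysplit pre cs) = List.replicate pre.length l ++ lmA l cs := by
  induction cs with
  | nil => intro pre l; simp [mysplit, brun, lmA]
  | cons c rest ih =>
      intro pre l
      by_cases h : c = '\n'
      · subst h
        simp only [mysplit, if_true]
        obtain ⟨b, rs, hb⟩ : ∃ b rs, mysplit [] rest = b :: rs := by
          cases hres : mysplit [] rest with
          | nil => exact absurd hres (mysplit_ne_nil rest [])
          | cons b rs => exact ⟨b, rs, rfl⟩
        rw [hb, brun, ← hb, ih [] (l + 1)]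
        simp [lmA, List.replicate_succ']
      · simp only [mysplit, h, if_false]
        rw [ih (pre ++ [c]) l]
        simp [lmA, h, List.replicate_succ']

theorem foldB_eq (lines : List (List Char)) : ∀ (total i : Nat) (m : List Int),
    i + lines.length = total →
    (PySem.List.enumerate lines (i : Int)).foldl
      (fun m p => m ++ List.replicate (p.2.length + (if p.1 < (total : Int) - 1 then 1 else 0)) (p.1 + 1)) m
    = m ++ brun ((i : Int) + 1) lines := by
  induction lines with
  | nil => intro total i m _; simp [PySem.List.enumerate_nil, brun]
  | cons line rest ih =>
      intro total i m htot
      rw [PySem.List.enumerate_cons, List.foldl_cons]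
      cases rest with
      | nil =>
          have hlt : ¬ ((i : Int) < (total : Int) - 1) := by
            simp at htot; omega
          simp [PySem.List.enumerate_nil, brun, hlt]
      | cons b rs =>
          have hlt : (i : Int) < (total : Int) - 1 := by
            simp at htot; omega
          have : ((i : Int) + 1) = ((i + 1 : Nat) : Int) := by push_cast; ring
          rw [this, ih total (i + 1) _ (by simp at htot ⊢; omega)]
          simp [brun, hlt]

-- ===== VERDICT (by name: the statement is the Claim_ definition above) =====
theorem get_linemap_spec : Claim_equal_get_linemap := by
  intro text _
  unfold Spec_get_linemap get_linemap get_linemap_alt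
  rw [foldA_eq, splitOn_eq]
  rw [show ((0 : Int)) = ((0 : Nat) : Int) from rfl,
      foldB_eq (mysplit [] text.toList) (mysplit [] text.toList).length 0 [] (by simp)]
  rw [brun_mysplit]
  simp
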